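-- pv_equiv track=rewrite | github.com/larixlarix/advent_of_code | 2025/aoc25_06.py | math_homework
-- ===== SOURCE A (Python) =====
-- def process_input(input):
--     data = [line.rstrip('\n') for line in input.split('\n')]
--     operator_list = list(data[-1].split())
--     return data, operator_list
--
-- def math_homework(input):
--     data, operator_list = process_input(input)
--
--     column_results = list(map(lambda op: 1 if op == '*' else 0, operator_list))
--
--     for line in data[:-1]:
--         for i, n in enumerate(line.split()):
--             if operator_list[i] == '*':
--                 column_results[i] *= int(n)
--             else:
--                 column_results[i] += int(n)
--     return sum(column_results)
-- ===== SOURCE B (Python) =====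
-- def math_homework(input):
--     lines = input.split('\n')
--     operator_list = lines[-1].split()
--     rows = [line.split() for line in lines[:-1]]
--     total = 0
--     for i, op in enumerate(operator_list):
--         col = [int(row[i]) for row in rows if i < len(row)]
--         if op == '*':
--             r = 1
--             for v in col:
--                 r *= v
--         else:
--             r = sum(col)
--         total += r
--     return total
-- ===== Notes on version B (the rewrite author's own statement) =====
-- stated objective: alternative
-- what changed: A makes a row-major pass mutating a per-column accumulator array in place; B tokenizes the rows once and then makes a column-major pass, gathering each column as a list and reducing it as a whole (product for '*', sum otherwise).
-- outside the precondition, e.g. on math_homework('1 2 3\n+ *'): A raises IndexError, B returns 3; on math_homework('x\n+'): A raises ValueError, B raises ValueError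
import Mathlib
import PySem

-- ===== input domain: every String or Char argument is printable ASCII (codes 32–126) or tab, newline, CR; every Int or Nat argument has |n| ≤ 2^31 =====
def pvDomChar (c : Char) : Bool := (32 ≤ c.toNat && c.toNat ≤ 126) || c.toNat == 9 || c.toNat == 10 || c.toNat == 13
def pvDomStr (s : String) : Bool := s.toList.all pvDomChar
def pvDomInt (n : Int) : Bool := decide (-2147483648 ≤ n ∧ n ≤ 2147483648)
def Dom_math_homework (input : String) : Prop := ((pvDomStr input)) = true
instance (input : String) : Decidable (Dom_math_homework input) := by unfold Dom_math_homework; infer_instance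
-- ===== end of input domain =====

-- B replaces A's row-major loop over a mutable per-column accumulator array by a
-- column-major pass: tokenize the rows once, then reduce each column as a whole
-- (product for '*', sum otherwise) and add the reductions up (objective: alternative).

-- ===== PORT A =====
-- line.rstrip('\n') ported by hand, exact: drop trailing '\n' characters.
def pvRstripNl (s : String) : String :=
  String.ofList ((s.toList.reverse.dropWhile (fun c => c == '\n')).reverse)

-- total getD forms (pyGetD/pySetD/(ofStr? _).getD) are used only where
-- Pre_math_homework rules out the IndexError / ValueError of the Python.
def math_homework (input : String) : Int :=
  let data : List String := ((PySem.Str.split? input "\n").getD []).map pvRstripNl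
  let operator_list : List String :=
    PySem.Str.split₀ ((PySem.List.pyGet? data (-1)).getD "")
  let column_results : List Int :=
    operator_list.map (fun op => if op = "*" then (1 : Int) else 0)
  let final : List Int :=
    (PySem.List.slice data none (some (-1))).foldl
      (fun cr line =>
        (PySem.List.enumerate (PySem.Str.split₀ line) 0).foldl
          (fun cr p =>
            if PySem.List.pyGetD operator_list p.1 "" = "*" then
              PySem.List.pySetD cr p.1
                (PySem.List.pyGetD cr p.1 0 * (PySem.Int.ofStr? p.2).getD 0)
            else
              PySem.List.pySetD cr p.1
                (PySem.List.pyGetD cr p.1 0 + (PySem.Int.ofStr? p.2).getD 0))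
          cr)
      column_results
  final.sum

-- ===== PORT B =====
def math_homework_alt (input : String) : Int :=
  let lines : List String := (PySem.Str.split? input "\n").getD []
  let operator_list : List String :=
    PySem.Str.split₀ ((PySem.List.pyGet? lines (-1)).getD "")
  let rows : List (List String) :=
    (PySem.List.slice lines none (some (-1))).map PySem.Str.split₀
  (PySem.List.enumerate operator_list 0).foldl
    (fun total p =>
      let col : List Int :=
        rows.filterMap (fun row =>
          if p.1 < (row.length : Int) then
            some ((PySem.Int.ofStr? (PySem.List.pyGetD row p.1 "")).getD 0)
          else none)
      total + (if p.2 = "*" then col.foldl (· * ·) 1 else col.sum))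
    0

-- ===== PRECONDITION & SPEC =====
-- Pre_ excludes exactly the inputs where the Python A raises: a data row wider than
-- the operator row (IndexError) or a token that is not an int literal (ValueError).
def Pre_math_homework (input : String) : Prop :=
  let lines : List String := (PySem.Str.split? input "\n").getD []
  let ops : List String := PySem.Str.split₀ (lines.getLast?.getD "")
  ∀ line ∈ lines.dropLast,
    (PySem.Str.split₀ line).length ≤ ops.length ∧
    ∀ tok ∈ PySem.Str.split₀ line, (PySem.Int.ofStr? tok).isSome = true
instance (input : String) : Decidable (Pre_math_homework input) := by
  unfold Pre_math_homework; infer_instance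

def pvWitness_math_homework : String := "1 2\n3 4\n* +"

def Spec_math_homework (input : String) (out : Int) : Prop := out = math_homework_alt input
instance (input : String) (out : Int) : Decidable (Spec_math_homework input out) := by
  unfold Spec_math_homework; infer_instance

-- ===== CLAIM (what is proved, stated in full; the proofs are below) =====
def Claim_equal_math_homework : Prop := ∀ (input : String), Dom_math_homework input → Pre_math_homework input → Spec_math_homework input (math_homework input)

-- ===== LEMMAS AND PROOFS =====

-- ---- abbreviations for the loop bodies (definitionally equal to the ports' lambdas) ----
def pvVal (t : String) : Int := (PySem.Int.ofStr? t).getD 0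

def pvOp (ops : List String) (i : Nat) (x : Int) (t : String) : Int :=
  if PySem.List.pyGetD ops (i : Int) "" = "*" then x * pvVal t else x + pvVal t

def pvStep (ops : List String) (cr : List Int) (p : Int × String) : List Int :=
  if PySem.List.pyGetD ops p.1 "" = "*" then
    PySem.List.pySetD cr p.1 (PySem.List.pyGetD cr p.1 0 * (PySem.Int.ofStr? p.2).getD 0)
  else
    PySem.List.pySetD cr p.1 (PySem.List.pyGetD cr p.1 0 + (PySem.Int.ofStr? p.2).getD 0)

-- ---- rstrip('\n') does not change split() ----
theorem pv_go_ws (ws cur : List Char) (acc : List (List Char))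
    (h : ∀ c ∈ ws, PySem.Chars.isspace c = true) :
    PySem.Chars.split₀.go ws cur acc = PySem.Chars.split₀.go [] cur acc := by
  induction ws generalizing cur acc with
  | nil => rfl
  | cons c rest ih =>
    conv_lhs => rw [PySem.Chars.split₀.go]
    rw [if_pos (h c (by simp))]
    conv_rhs => rw [PySem.Chars.split₀.go]
    have h' : ∀ c ∈ rest, PySem.Chars.isspace c = true := fun c hc => h c (by simp [hc])
    by_cases hcur : cur.isEmpty
    · rw [if_pos hcur, if_pos hcur, ih [] acc h', PySem.Chars.split₀.go]; rfl
    · rw [if_neg hcur, if_neg hcur, ih [] (cur.reverse :: acc) h', PySem.Chars.split₀.go]; rfl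

theorem pv_go_append_ws (s ws cur : List Char) (acc : List (List Char))
    (h : ∀ c ∈ ws, PySem.Chars.isspace c = true) :
    PySem.Chars.split₀.go (s ++ ws) cur acc = PySem.Chars.split₀.go s cur acc := by
  induction s generalizing cur acc with
  | nil => simpa using pv_go_ws ws cur acc h
  | cons c rest ih =>
    rw [List.cons_append]
    conv_lhs => rw [PySem.Chars.split₀.go]
    conv_rhs => rw [PySem.Chars.split₀.go]
    split_ifs <;> apply ih

theorem pv_split₀_rstrip (cs : List Char) :
    PySem.Chars.split₀ ((cs.reverse.dropWhile (fun c => c == '\n')).reverse) =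
      PySem.Chars.split₀ cs := by
  have hsplit : cs = (cs.reverse.dropWhile (fun c => c == '\n')).reverse ++
      (cs.reverse.takeWhile (fun c => c == '\n')).reverse := by
    conv_lhs => rw [← List.reverse_reverse cs,
      ← List.takeWhile_append_dropWhile (p := fun c => c == '\n') (l := cs.reverse)]
    rw [List.reverse_append]
  have hws : ∀ c ∈ (cs.reverse.takeWhile (fun c => c == '\n')).reverse,
      PySem.Chars.isspace c = true := by
    intro c hc
    rw [List.mem_reverse] at hc
    have hp := List.mem_takeWhile_imp hc
    have hc' : c = '\n' := by simpa using hp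
    subst hc'; decide
  conv_rhs => rw [hsplit]
  unfold PySem.Chars.split₀
  exact (pv_go_append_ws _ _ _ _ hws).symm

theorem pv_split₀_pvRstripNl (s : String) :
    PySem.Str.split₀ (pvRstripNl s) = PySem.Str.split₀ s := by
  unfold PySem.Str.split₀ pvRstripNl
  rw [String.toList_ofList, pv_split₀_rstrip]

-- ---- generic list facts ----
theorem pv_slice_dropLast {α : Type} (xs : List α) :
    PySem.List.slice xs none (some (-1)) = xs.dropLast := by
  rcases xs with _ | ⟨a, t⟩
  · rfl
  · simp only [PySem.List.slice, PySem.List.clampIdx, List.dropLast_eq_take]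
    split_ifs with h1 h2
    all_goals simp_all
    omega

theorem pv_pyGet?_map {α β : Type} (xs : List α) (f : α → β) (i : Int) :
    PySem.List.pyGet? (xs.map f) i = (PySem.List.pyGet? xs i).map f := by
  simp only [PySem.List.pyGet?, List.length_map]
  cases PySem.List.pyIdx? xs.length i <;> simp

theorem pv_pySetD_oob {α : Type} (xs : List α) (s : Nat) (v : α) (h : xs.length ≤ s) :
    PySem.List.pySetD xs (s : Int) v = xs := by
  have : PySem.List.pySet? xs (s : Int) v = none := by
    rw [PySem.List.pySet?_eq_none_iff, PySem.Raise.InRange]; omega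
  simp [PySem.List.pySetD, this]

theorem pv_step_eq (ops : List String) (cr : List Int) (s : Nat) (t : String) :
    pvStep ops cr ((s : Int), t) =
      PySem.List.pySetD cr (s : Int) (pvOp ops s (PySem.List.pyGetD cr (s : Int) 0) t) := by
  unfold pvStep pvOp pvVal
  split_ifs <;> rfl

-- ---- the inner (per-row) loop, characterised pointwise ----
theorem pv_len_foldl_step (ops : List String) (l : List (Int × String)) (cr : List Int) :
    (l.foldl (pvStep ops) cr).length = cr.length := by
  induction l generalizing cr with
  | nil => rfl
  | cons p rest ih =>
    rw [List.foldl_cons, ih]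
    unfold pvStep
    split_ifs <;> rw [PySem.List.length_pySetD]

theorem pv_inner (ops : List String) (r : List String) (s i : Nat) (cr : List Int)
    (hi : i < cr.length) :
    PySem.List.pyGetD ((PySem.List.enumerate r (s : Int)).foldl (pvStep ops) cr) (i : Int) 0 =
      if s ≤ i ∧ i < s + r.length then
        pvOp ops i (PySem.List.pyGetD cr (i : Int) 0) (r.getD (i - s) "")
      else PySem.List.pyGetD cr (i : Int) 0 := by
  induction r generalizing s cr with
  | nil => simp [PySem.List.enumerate_nil]
  | cons t rest ih =>
    rw [PySem.List.enumerate_cons, List.foldl_cons]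
    have hcast : (s : Int) + 1 = ((s + 1 : Nat) : Int) := by push_cast; ring
    rw [pv_step_eq, hcast]
    by_cases hs : s < cr.length
    · have hlen' : (PySem.List.pySetD cr (s:Int)
          (pvOp ops s (PySem.List.pyGetD cr (s:Int) 0) t)).length = cr.length :=
        PySem.List.length_pySetD _ _ _
      rw [ih (s+1) _ (by rw [hlen']; exact hi)]
      have hget : ∀ m : Nat, PySem.List.pyGetD (PySem.List.pySetD cr (s:Int)
          (pvOp ops s (PySem.List.pyGetD cr (s:Int) 0) t)) (m:Int) 0 =
          if m = s then pvOp ops s (PySem.List.pyGetD cr (s:Int) 0) t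
          else PySem.List.pyGetD cr (m:Int) 0 :=
        fun m => PySem.List.pyGetD_pySetD_natCast cr s m _ 0 hs
      rw [hget i]
      simp only [List.length_cons]
      rcases Nat.lt_trichotomy i s with h | h | h
      · have hA1 : ¬(s + 1 ≤ i ∧ i < s + 1 + rest.length) := by omega
        have h2 : ¬(i = s) := by omega
        have hR : ¬(s ≤ i ∧ i < s + (rest.length + 1)) := by omega
        rw [if_neg hA1, if_neg h2, if_neg hR]
      · have hA1 : ¬(s + 1 ≤ i ∧ i < s + 1 + rest.length) := by omega
        rw [if_neg hA1, if_pos h, if_pos (by omega : s ≤ i ∧ i < s + (rest.length + 1))]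
        subst h
        simp
      · have h2 : ¬(i = s) := by omega
        by_cases hlt : i < s + 1 + rest.length
        · rw [if_pos (⟨by omega, hlt⟩ : s + 1 ≤ i ∧ i < s + 1 + rest.length), if_neg h2,
            if_pos (⟨by omega, by omega⟩ : s ≤ i ∧ i < s + (rest.length + 1))]
          congr 1
          have h7 : i - s = (i - (s + 1)) + 1 := by omega
          rw [h7, List.getD_cons_succ]
        · rw [if_neg (by omega : ¬(s + 1 ≤ i ∧ i < s + 1 + rest.length)), if_neg h2,
            if_neg (by omega : ¬(s ≤ i ∧ i < s + (rest.length + 1)))]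
    · have hoob : PySem.List.pySetD cr (s:Int)
          (pvOp ops s (PySem.List.pyGetD cr (s:Int) 0) t) = cr :=
        pv_pySetD_oob _ _ _ (by omega)
      simp only [List.length_cons]
      rw [hoob, ih (s+1) cr hi,
        if_neg (by omega : ¬(s + 1 ≤ i ∧ i < s + 1 + rest.length)),
        if_neg (by omega : ¬(s ≤ i ∧ i < s + (rest.length + 1)))]

-- ---- the outer (rows) loop: each column folds independently ----
theorem pv_outer (ops : List String) (rows : List (List String)) (cr : List Int) (i : Nat)
    (hi : i < cr.length) :
    PySem.List.pyGetD
        (rows.foldl (fun cr r => (PySem.List.enumerate r 0).foldl (pvStep ops) cr) cr) (i : Int) 0 =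
      (rows.filterMap (fun r => r[i]?)).foldl (pvOp ops i) (PySem.List.pyGetD cr (i : Int) 0) := by
  induction rows generalizing cr with
  | nil => rfl
  | cons r rest ih =>
    rw [List.foldl_cons, List.filterMap_cons]
    have hlen' := pv_len_foldl_step ops (PySem.List.enumerate r 0) cr
    rw [ih _ (by rw [hlen']; exact hi)]
    have hin := pv_inner ops r 0 i cr hi
    simp only [Nat.cast_zero, Nat.zero_le, true_and, zero_add, Nat.sub_zero] at hin
    rw [hin]
    by_cases hlt : i < r.length
    · rw [List.getElem?_eq_getElem hlt, if_pos hlt, List.foldl_cons]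
      congr 2
      exact List.getD_eq_getElem r "" hlt
    · rw [List.getElem?_eq_none_iff.mpr (by omega), if_neg hlt]

theorem pv_len_outer (ops : List String) (rows : List (List String)) (cr : List Int) :
    (rows.foldl (fun cr r => (PySem.List.enumerate r 0).foldl (pvStep ops) cr) cr).length =
      cr.length := by
  induction rows generalizing cr with
  | nil => rfl
  | cons r rest ih => rw [List.foldl_cons, ih, pv_len_foldl_step]

-- ---- B's guarded column comprehension is the token column mapped through int() ----
theorem pv_col_eq (rows : List (List String)) (i : Nat) :
    rows.filterMap (fun row =>
        if (i : Int) < (row.length : Int) then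
          some ((PySem.Int.ofStr? (PySem.List.pyGetD row (i : Int) "")).getD 0)
        else none) =
      (rows.filterMap (fun r => r[i]?)).map pvVal := by
  induction rows with
  | nil => rfl
  | cons r rest ih =>
    rw [List.filterMap_cons, List.filterMap_cons, ih]
    by_cases h : i < r.length
    · rw [if_pos (by exact_mod_cast h), List.getElem?_eq_getElem h]
      simp [pvVal, PySem.List.pyGetD_natCast, List.getD_eq_getElem?_getD,
        List.getElem?_eq_getElem h]
    · rw [if_neg (by exact_mod_cast h), List.getElem?_eq_none_iff.mpr (by omega)]


-- ---- operator row: rstrip('\n') on the last line does not change it ----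
theorem pv_ops_eq (lines : List String) :
    PySem.Str.split₀ ((PySem.List.pyGet? (lines.map pvRstripNl) (-1)).getD "") =
      PySem.Str.split₀ ((PySem.List.pyGet? lines (-1)).getD "") := by
  rw [pv_pyGet?_map]
  cases h : PySem.List.pyGet? lines (-1) with
  | none => rfl
  | some x => simp [pv_split₀_pvRstripNl]

-- ---- the two loop organisations compute the same total ----
theorem pv_core (ops : List String) (rows : List (List String)) :
    (rows.foldl (fun cr r => (PySem.List.enumerate r 0).foldl (pvStep ops) cr)
        (ops.map fun op => if op = "*" then (1 : Int) else 0)).sum =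
      (PySem.List.enumerate ops 0).foldl (fun total p =>
        total + (if p.2 = "*" then
            (rows.filterMap fun row => if p.1 < (row.length : Int) then
              some ((PySem.Int.ofStr? (PySem.List.pyGetD row p.1 "")).getD 0) else none).foldl
              (· * ·) 1
          else
            (rows.filterMap fun row => if p.1 < (row.length : Int) then
              some ((PySem.Int.ofStr? (PySem.List.pyGetD row p.1 "")).getD 0) else none).sum)) 0 := by
  rw [PySem.List.foldl_add, zero_add]
  apply congrArg List.sum
  apply List.ext_getElem
  · rw [pv_len_outer, List.length_map, List.length_map, PySem.List.length_enumerate]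
  intro i h1 h2
  rw [List.getElem_map, PySem.List.getElem_enumerate]
  have hlenF := pv_len_outer ops rows (ops.map fun op => if op = "*" then (1 : Int) else 0)
  rw [List.length_map] at hlenF
  have hi : i < ops.length := by
    rw [List.length_map, PySem.List.length_enumerate] at h2; exact h2
  have hiF : i < (rows.foldl (fun cr r => (PySem.List.enumerate r 0).foldl (pvStep ops) cr)
      (ops.map fun op => if op = "*" then (1 : Int) else 0)).length := by omega
  have hF : (rows.foldl (fun cr r => (PySem.List.enumerate r 0).foldl (pvStep ops) cr)
        (ops.map fun op => if op = "*" then (1 : Int) else 0))[i] =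
      PySem.List.pyGetD (rows.foldl (fun cr r => (PySem.List.enumerate r 0).foldl (pvStep ops) cr)
        (ops.map fun op => if op = "*" then (1 : Int) else 0)) (i : Int) 0 := by
    rw [PySem.List.pyGetD_natCast, List.getD_eq_getElem _ _ hiF]
  rw [hF, pv_outer ops rows _ i (by rw [List.length_map]; exact hi)]
  have hseed : PySem.List.pyGetD (ops.map fun op => if op = "*" then (1 : Int) else 0) (i : Int) 0 =
      if ops[i] = "*" then (1 : Int) else 0 := by
    rw [PySem.List.pyGetD_natCast, List.getD_eq_getElem _ _ (by rw [List.length_map]; exact hi),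
      List.getElem_map]
  rw [hseed]
  have hgetop : PySem.List.pyGetD ops (i : Int) "" = ops[i] := by
    rw [PySem.List.pyGetD_natCast, List.getD_eq_getElem _ _ hi]
  simp only [zero_add, pv_col_eq]
  by_cases hop : ops[i] = "*"
  · rw [if_pos hop, if_pos hop]
    have hfn : pvOp ops i = fun x t => x * pvVal t := by
      funext x t; unfold pvOp; rw [hgetop, if_pos hop]
    rw [hfn, List.foldl_map]
  · rw [if_neg hop, if_neg hop]
    have hfn : pvOp ops i = fun x t => x + pvVal t := by
      funext x t; unfold pvOp; rw [hgetop, if_neg hop]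
    rw [hfn, List.sum_eq_foldl, List.foldl_map]
theorem pv_core' (ops : List String) (ls : List String) :
    (ls.foldl (fun cr line =>
        (PySem.List.enumerate (PySem.Str.split₀ line) 0).foldl (pvStep ops) cr)
        (ops.map fun op => if op = "*" then (1 : Int) else 0)).sum =
      (PySem.List.enumerate ops 0).foldl (fun total p =>
        total + (if p.2 = "*" then
            ((ls.map PySem.Str.split₀).filterMap fun row => if p.1 < (row.length : Int) then
              some ((PySem.Int.ofStr? (PySem.List.pyGetD row p.1 "")).getD 0) else none).foldl
              (· * ·) 1
          else
            ((ls.map PySem.Str.split₀).filterMap fun row => if p.1 < (row.length : Int) then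
              some ((PySem.Int.ofStr? (PySem.List.pyGetD row p.1 "")).getD 0) else none).sum)) 0 := by
  rw [show ls.foldl (fun cr line =>
        (PySem.List.enumerate (PySem.Str.split₀ line) 0).foldl (pvStep ops) cr)
        (ops.map fun op => if op = "*" then (1 : Int) else 0) =
      (ls.map PySem.Str.split₀).foldl (fun cr r =>
        (PySem.List.enumerate r 0).foldl (pvStep ops) cr)
        (ops.map fun op => if op = "*" then (1 : Int) else 0) from
    (List.foldl_map (f := PySem.Str.split₀)
      (g := fun cr r => List.foldl (pvStep ops) cr (PySem.List.enumerate r))).symm]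
  exact pv_core ops (ls.map PySem.Str.split₀)

-- ===== VERDICT (by name: the statement is the Claim_ definition above) =====
theorem math_homework_spec : Claim_equal_math_homework := by
  intro input _ _
  unfold Spec_math_homework math_homework math_homework_alt
  simp only [pv_slice_dropLast, ← List.map_dropLast, pv_ops_eq, List.foldl_map,
    pv_split₀_pvRstripNl]
  exact pv_core' _ _
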